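-- pv_equiv track=rewrite | github.com/OCoderO/Elements-of-Software-Design---UT-Austin | Greatest Path Sum in Triangle - A11/Triangle.py | dyn_helper
-- ===== SOURCE A (Python) =====
-- def dyn_helper (grid, row, col):
--   # Check if we have reached the bottom of the triangle
--   if row >= len(grid):
--     return 0
--   else:
--     # You can have another list to store the maximum paths in each cell, and moving from the bottom of the triangle to the top.
--     a = grid[row][col] + dyn_helper (grid, row + 1, col)
--     b = grid[row][col] + dyn_helper (grid, row + 1, col + 1)
--     if a > b:
--       return a
--     else:
--       return b
-- ===== SOURCE B (Python) =====
-- def dyn_helper(grid, row, col):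
--     # Bottom-up DP over path offsets instead of top-down branching recursion.
--     n = len(grid)
--     if row >= n:
--         return 0
--     dp = [0] * (n - row + 1)
--     for r in range(n - 1, row - 1, -1):
--         dp = [grid[r][col + k] + max(dp[k], dp[k + 1]) for k in range(r - row + 1)]
--     return dp[0]
-- ===== Notes on version B (the rewrite author's own statement) =====
-- stated objective: alternative
-- what changed: replaces the top-down branching recursion with a bottom-up dynamic-programming pass that keeps one list of best path sums per row, reading the same triangle cells
import Mathlib
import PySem

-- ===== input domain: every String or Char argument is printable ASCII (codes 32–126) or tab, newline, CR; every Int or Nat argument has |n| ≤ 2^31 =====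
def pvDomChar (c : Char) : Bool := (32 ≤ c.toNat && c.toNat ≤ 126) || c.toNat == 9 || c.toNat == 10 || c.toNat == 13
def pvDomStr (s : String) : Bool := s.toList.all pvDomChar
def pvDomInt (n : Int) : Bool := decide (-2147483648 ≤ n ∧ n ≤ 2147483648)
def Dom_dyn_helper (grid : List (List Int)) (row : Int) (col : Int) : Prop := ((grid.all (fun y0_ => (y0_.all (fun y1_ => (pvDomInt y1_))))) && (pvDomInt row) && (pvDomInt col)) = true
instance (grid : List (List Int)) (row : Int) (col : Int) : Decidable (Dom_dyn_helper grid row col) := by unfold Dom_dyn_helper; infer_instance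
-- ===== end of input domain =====

-- B replaces A's top-down branching recursion by a bottom-up DP pass over the same cells.

-- ===== PORT A =====
-- literal transliteration of A; grid[row][col] is PySem.List.pyGet? (none = IndexError,
-- defaulted to 0 — Pre_ excludes exactly those inputs)
def dyn_helper (grid : List (List Int)) (row : Int) (col : Int) : Int :=
  if (grid.length : Int) ≤ row then 0
  else
    let a := (PySem.List.pyGet? ((PySem.List.pyGet? grid row).getD []) col).getD 0 + dyn_helper grid (row + 1) col
    let b := (PySem.List.pyGet? ((PySem.List.pyGet? grid row).getD []) col).getD 0 + dyn_helper grid (row + 1) (col + 1)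
    if a > b then a else b
termination_by ((grid.length : Int) - row).toNat
decreasing_by all_goals omega

-- ===== PORT B =====
-- literal transliteration of Source B: one dp list folded over range(n-1, row-1, -1)
def dyn_helper_alt (grid : List (List Int)) (row : Int) (col : Int) : Int :=
  let n : Int := grid.length
  if n ≤ row then 0
  else
    let dp0 : List Int := List.replicate (n - row + 1).toNat 0
    let dp := (PySem.List.pyRange (n - 1) (row - 1) (-1)).foldl
      (fun dp r =>
        (PySem.List.pyRange 0 (r - row + 1) 1).map (fun k =>
          (PySem.List.pyGet? ((PySem.List.pyGet? grid r).getD []) (col + k)).getD 0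
          + max ((PySem.List.pyGet? dp k).getD 0) ((PySem.List.pyGet? dp (k + 1)).getD 0)))
      dp0
    (PySem.List.pyGet? dp 0).getD 0

-- ===== PRECONDITION & SPEC =====
-- Pre_ excludes exactly the inputs where Python A raises IndexError: some visited cell
-- grid[r][col+k] (row ≤ r < len(grid), 0 ≤ k ≤ r - row) is out of range.
def Pre_dyn_helper (grid : List (List Int)) (row : Int) (col : Int) : Prop :=
  (grid.length : Int) ≤ row ∨
  (-(grid.length : Int) ≤ row ∧
    ∀ r ∈ PySem.List.pyRange row (grid.length) 1,
      ∀ k ∈ PySem.List.pyRange 0 (r - row + 1) 1,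
        (PySem.List.pyGet? ((PySem.List.pyGet? grid r).getD []) (col + k)).isSome = true)
instance (grid : List (List Int)) (row : Int) (col : Int) : Decidable (Pre_dyn_helper grid row col) := by
  unfold Pre_dyn_helper; infer_instance

def pvWitness_dyn_helper : List (List Int) × Int × Int := ([[1], [2, 3], [4, 5, 6]], 0, 0)

def Spec_dyn_helper (grid : List (List Int)) (row : Int) (col : Int) (out : Int) : Prop := out = dyn_helper_alt grid row col
instance (grid : List (List Int)) (row : Int) (col : Int) (out : Int) : Decidable (Spec_dyn_helper grid row col out) := by unfold Spec_dyn_helper; infer_instance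

-- ===== CLAIM (what is proved, stated in full; the proofs are below) =====
def Claim_equal_dyn_helper : Prop := ∀ (grid : List (List Int)) (row : Int) (col : Int), Dom_dyn_helper grid row col → Pre_dyn_helper grid row col → Spec_dyn_helper grid row col (dyn_helper grid row col)

-- ===== LEMMAS AND PROOFS =====

-- the dp list B maintains after processing row r: entry k is A's value at (r, col + k)
def dpSpec (grid : List (List Int)) (row col r : Int) : List Int :=
  (PySem.List.pyRange 0 (r - row + 1) 1).map (fun k => dyn_helper grid r (col + k))

-- B's loop body
def stepB (grid : List (List Int)) (row col : Int) (dp : List Int) (r : Int) : List Int :=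
  (PySem.List.pyRange 0 (r - row + 1) 1).map (fun k =>
    (PySem.List.pyGet? ((PySem.List.pyGet? grid r).getD []) (col + k)).getD 0
    + max ((PySem.List.pyGet? dp k).getD 0) ((PySem.List.pyGet? dp (k + 1)).getD 0))

lemma pyGet?_dpSpec (grid : List (List Int)) (row col r k : Int)
    (h0 : 0 ≤ k) (h1 : k ≤ r - row) :
    ((PySem.List.pyGet? (dpSpec grid row col r) k).getD 0) = dyn_helper grid r (col + k) := by
  unfold dpSpec
  rw [PySem.List.pyGet?_of_nonneg (h := h0)]
  rw [List.getElem?_map]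
  rw [List.getElem?_eq_getElem (by simp [PySem.List.length_pyRange_one]; omega)]
  simp [PySem.List.getElem_pyRange_one]
  congr 2; omega

lemma stepB_dpSpec (grid : List (List Int)) (row col r : Int)
    (_hr1 : row ≤ r) (hr2 : r < (grid.length : Int)) :
    stepB grid row col (dpSpec grid row col (r + 1)) r = dpSpec grid row col r := by
  unfold stepB
  conv_rhs => unfold dpSpec
  apply List.map_congr_left
  intro k hk
  rw [PySem.List.mem_pyRange_one] at hk
  rw [pyGet?_dpSpec grid row col (r + 1) k hk.1 (by omega)]
  rw [pyGet?_dpSpec grid row col (r + 1) (k + 1) (by omega) (by omega)]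
  conv_rhs => rw [dyn_helper]
  rw [if_neg (by omega)]
  have hca : col + k + 1 = col + (k + 1) := by ring
  rw [hca]
  dsimp only
  split_ifs <;> omega

lemma foldl_dpSpec (grid : List (List Int)) (row col : Int) (j : Nat) (r : Int)
    (hr : r = row + j) (hn : r ≤ (grid.length : Int)) :
    (PySem.List.pyRange (r - 1) (row - 1) (-1)).foldl (stepB grid row col) (dpSpec grid row col r)
      = dpSpec grid row col row := by
  induction j generalizing r with
  | zero =>
    rw [PySem.List.pyRange_neg_one_eq_nil (by omega)]
    simp only [List.foldl_nil]
    congr 1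
    omega
  | succ j ih =>
    rw [PySem.List.pyRange_neg_one_cons (by omega)]
    rw [List.foldl_cons]
    have h1 : r - 1 + 1 = r := by ring
    have := stepB_dpSpec grid row col (r - 1) (by omega) (by omega)
    rw [h1] at this
    rw [this]
    exact ih (r - 1) (by omega) (by omega)

lemma dp0_eq_dpSpec (grid : List (List Int)) (row col : Int) (h : row < (grid.length : Int)) :
    List.replicate (((grid.length : Int) - row + 1)).toNat 0
      = dpSpec grid row col (grid.length : Int) := by
  have hz : ∀ c : Int, dyn_helper grid (grid.length : Int) c = 0 := by
    intro c; rw [dyn_helper]; simp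
  unfold dpSpec
  rw [List.map_congr_left (fun k _ => hz (col + k))]
  rw [List.map_const']
  rw [PySem.List.length_pyRange_one]
  congr 1
  omega

-- ===== VERDICT (by name: the statement is the Claim_ definition above) =====
theorem dyn_helper_spec : Claim_equal_dyn_helper := by
  intro grid row col _ _
  unfold Spec_dyn_helper dyn_helper_alt
  by_cases h : (grid.length : Int) ≤ row
  · simp only [h, if_true]
    rw [dyn_helper]
    rw [if_pos h]
  · simp only [h, if_false]
    rw [dp0_eq_dpSpec grid row col (by omega)]
    have hfold := foldl_dpSpec grid row col ((grid.length : Int) - row).toNat (grid.length : Int)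
      (by omega) (by omega)
    rw [show (fun (dp : List Int) (r : Int) =>
          (PySem.List.pyRange 0 (r - row + 1) 1).map (fun k =>
            (PySem.List.pyGet? ((PySem.List.pyGet? grid r).getD []) (col + k)).getD 0
            + max ((PySem.List.pyGet? dp k).getD 0) ((PySem.List.pyGet? dp (k + 1)).getD 0)))
        = stepB grid row col from rfl]
    rw [hfold]
    have := pyGet?_dpSpec grid row col row 0 (by omega) (by omega)
    rw [this]
    rw [show col + 0 = col by ring]
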